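-- pv_equiv track=rewrite | github.com/rennaMAhcuS/Librispeech | app.py | phonemes_to_words
-- ===== SOURCE A (Python) =====
-- def phonemes_to_words(predicted_phonemes, inverse_dict, max_n=5):
--     i = 0
--     result = []
--     while i < len(predicted_phonemes):
--         matched = False
--         for n in range(min(max_n, len(predicted_phonemes) - i), 0, -1):
--             ngram = " ".join(predicted_phonemes[i:i + n])
--             if ngram in inverse_dict:
--                 # Get the word from inverse_dict and ensure it's a string
--                 word = inverse_dict[ngram]
--                 if isinstance(word, list):  # If it's a list, take the first item
--                     if word:  # Check if a list is not empty
--                         word = word[0]  # Take the first option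
--                     else:
--                         word = ngram  # Fallback to the original ngram
--                 result.append(str(word))  # Convert to string just to be safe
--                 i += n
--                 matched = True
--                 break
--         if not matched:
--             # Skip this phoneme
--             i += 1
--     return result
-- ===== SOURCE B (Python) =====
-- def phonemes_to_words(predicted_phonemes, inverse_dict, max_n=5):
--     # Scan the suffix list; at each position make one ascending incremental pass
--     # over up to max_n phonemes, remembering the last (= longest) dictionary hit.
--     result = []
--     rest = predicted_phonemes
--     while rest:
--         prefix = rest[:max_n] if max_n > 0 else []
--         ngram = ""
--         best = None
--         for n, ph in enumerate(prefix, start=1):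
--             ngram = ph if n == 1 else ngram + " " + ph
--             hit = inverse_dict.get(ngram)
--             if hit is not None:
--                 best = (n, hit)
--         if best is None:
--             rest = rest[1:]
--         else:
--             result.append(best[1])
--             rest = rest[best[0]:]
--     return result
-- ===== Notes on version B (the rewrite author's own statement) =====
-- stated objective: alternative
-- what changed: Replaces A's per-position descending scan, which re-joins each candidate slice from scratch and breaks on the first hit, by a single ascending pass over the current suffix that builds the candidate ngram incrementally and keeps the last (= longest) dictionary hit, advancing over list suffixes instead of indices.
import Mathlib
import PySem

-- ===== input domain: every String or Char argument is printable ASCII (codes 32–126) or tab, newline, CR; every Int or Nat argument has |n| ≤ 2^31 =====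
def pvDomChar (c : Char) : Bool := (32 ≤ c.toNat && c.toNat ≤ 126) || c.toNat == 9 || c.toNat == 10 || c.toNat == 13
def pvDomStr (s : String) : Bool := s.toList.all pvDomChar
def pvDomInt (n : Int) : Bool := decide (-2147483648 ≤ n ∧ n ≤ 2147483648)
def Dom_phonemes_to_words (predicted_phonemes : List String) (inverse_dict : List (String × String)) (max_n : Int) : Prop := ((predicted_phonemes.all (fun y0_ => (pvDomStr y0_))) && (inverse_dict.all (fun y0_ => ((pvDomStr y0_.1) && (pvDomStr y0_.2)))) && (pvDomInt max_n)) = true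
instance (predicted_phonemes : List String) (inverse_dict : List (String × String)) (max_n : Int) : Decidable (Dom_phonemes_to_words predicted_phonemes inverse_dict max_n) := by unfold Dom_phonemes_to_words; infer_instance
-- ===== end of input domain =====

-- B replaces A's per-position descending scan (re-joining each candidate slice from scratch)
-- by a single ascending pass over the suffix that builds the candidate ngram incrementally
-- and keeps the last (= longest) dictionary hit; objective: alternative.
-- (Values are strings here, so A's dead `isinstance(word, list)` branch is ported as the identity it is.)

-- ===== PORT A =====
-- inner `for n in range(min(max_n, len(..)-i), 0, -1): … break`: first hit counting down
def pvFindA (pp : List String) (d : List (String × String)) (i : Nat) : List Int → Option (Int × String)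
  | [] => none
  | n :: ns =>
    let ngram := PySem.Str.join " " (PySem.List.slice pp (some (i : Int)) (some ((i : Int) + n)))
    match (PySem.Dict.mk d).get? ngram with
    | some w => some (n, w)           -- `word` is a string (never a list) at our type, so str(word) = word
    | none => pvFindA pp d i ns

-- the while loop over the index i; fuel = remaining iterations (i grows by ≥ 1 each turn)
def pvLoopA (pp : List String) (d : List (String × String)) (max_n : Int) : Nat → Nat → List String
  | 0, _ => []
  | fuel + 1, i =>
    if i < pp.length then
      match pvFindA pp d i (PySem.List.pyRange (min max_n ((pp.length : Int) - (i : Int))) 0 (-1)) with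
      | some (n, w) => w :: pvLoopA pp d max_n fuel (i + n.toNat)
      | none => pvLoopA pp d max_n fuel (i + 1)
    else []

def phonemes_to_words (predicted_phonemes : List String) (inverse_dict : List (String × String)) (max_n : Int) : List String :=
  pvLoopA predicted_phonemes inverse_dict max_n predicted_phonemes.length 0

-- ===== PORT B =====
-- the `for n, ph in enumerate(prefix, 1)` pass: state = (n, ngram chars, best);
-- Python `ngram + " " + ph` is concatenation of characters, ported exactly as List.append on toList
def pvScanB (d : List (String × String)) (pref : List String) : Option (Nat × String) :=
  (pref.foldl
    (fun (st : Nat × List Char × Option (Nat × String)) ph =>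
      let n := st.1 + 1
      let ng := if n = 1 then ph.toList else st.2.1 ++ ' ' :: ph.toList
      match (PySem.Dict.mk d).get? (String.ofList ng) with
      | some w => (n, ng, some (n, w))
      | none => (n, ng, st.2.2))
    (0, [], none)).2.2

def pvLoopB (d : List (String × String)) (max_n : Int) : Nat → List String → List String
  | 0, _ => []
  | _, [] => []
  | fuel + 1, rest =>
    match pvScanB d (if max_n > 0 then rest.take max_n.toNat else []) with
    | some (n, w) => w :: pvLoopB d max_n fuel (rest.drop n)
    | none => pvLoopB d max_n fuel rest.tail

def phonemes_to_words_alt (predicted_phonemes : List String) (inverse_dict : List (String × String)) (max_n : Int) : List String :=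
  pvLoopB inverse_dict max_n predicted_phonemes.length predicted_phonemes

-- ===== PRECONDITION & SPEC =====
def Spec_phonemes_to_words (predicted_phonemes : List String) (inverse_dict : List (String × String)) (max_n : Int) (out : List String) : Prop := out = phonemes_to_words_alt predicted_phonemes inverse_dict max_n
instance (predicted_phonemes : List String) (inverse_dict : List (String × String)) (max_n : Int) (out : List String) : Decidable (Spec_phonemes_to_words predicted_phonemes inverse_dict max_n out) := by unfold Spec_phonemes_to_words; infer_instance

-- ===== CLAIM (what is proved, stated in full; the proofs are below) =====
def Claim_equal_phonemes_to_words : Prop := ∀ (predicted_phonemes : List String) (inverse_dict : List (String × String)) (max_n : Int), Dom_phonemes_to_words predicted_phonemes inverse_dict max_n → Spec_phonemes_to_words predicted_phonemes inverse_dict max_n (phonemes_to_words predicted_phonemes inverse_dict max_n)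

-- ===== LEMMAS AND PROOFS =====

-- common reference function: the largest m ≤ bound with " ".join of the first m tokens of t in the dict
def pvF (t : List String) (d : List (String × String)) : Nat → Option (Nat × String)
  | 0 => none
  | m + 1 =>
    match (PySem.Dict.mk d).get? (PySem.Str.join " " (t.take (m + 1))) with
    | some w => some (m + 1, w)
    | none => pvF t d m

theorem pvF_congr (t1 t2 : List String) (d : List (String × String)) (M : Nat)
    (h : ∀ m ≤ M, t1.take m = t2.take m) : pvF t1 d M = pvF t2 d M := by
  induction M with
  | zero => rfl
  | succ m ih =>
    simp only [pvF, h (m + 1) le_rfl]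
    cases (PySem.Dict.mk d).get? (PySem.Str.join " " (t2.take (m + 1))) with
    | some w => rfl
    | none => exact ih (fun k hk => h k (Nat.le_succ_of_le hk))

theorem pvFindA_eq (pp : List String) (d : List (String × String)) (i : Nat) (n : Int) :
    pvFindA pp d i (PySem.List.pyRange n 0 (-1)) =
      (pvF (pp.drop i) d n.toNat).map (fun p => ((p.1 : Int), p.2)) := by
  generalize hk : n.toNat = k
  induction k generalizing n with
  | zero =>
    rw [PySem.List.pyRange_neg_one_eq_nil (by omega)]
    simp [pvFindA, pvF]
  | succ m ih =>
    rw [PySem.List.pyRange_neg_one_cons (by omega : (0 : Int) < n)]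
    have hcast : (i : Int) + n = (i : Int) + ((m + 1 : Nat) : Int) := by omega
    simp only [pvFindA, hcast, PySem.List.slice_natCast_add, pvF]
    cases (PySem.Dict.mk d).get? (PySem.Str.join " " ((pp.drop i).take (m + 1))) with
    | some w =>
      simp only [Option.map_some]
      congr 1
      exact Prod.ext (by omega) rfl
    | none => exact ih (n - 1) (by omega)

-- " ".join grows on the right by " " ++ last token (the incremental ngram of B's inner pass)
theorem pvJoin_append_singleton (sep q : List Char) (ps : List (List Char)) (h : ps ≠ []) :
    PySem.Chars.join sep (ps ++ [q]) = PySem.Chars.join sep ps ++ sep ++ q := by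
  induction ps with
  | nil => exact absurd rfl h
  | cons p ps ih =>
    cases ps with
    | nil => simp [PySem.Chars.join_cons_cons, PySem.Chars.join_singleton]
    | cons p2 rest =>
      rw [show (p :: p2 :: rest) ++ [q] = p :: p2 :: (rest ++ [q]) by simp,
        PySem.Chars.join_cons_cons,
        show p2 :: (rest ++ [q]) = (p2 :: rest) ++ [q] by simp,
        ih (by simp), PySem.Chars.join_cons_cons]
      simp [List.append_assoc]

-- the characters the fold's ngram accumulator holds after the whole prefix
def pvChars (l : List String) : List Char := (PySem.Str.join " " l).toList

theorem pvChars_append_singleton (l : List String) (x : String) (h : l ≠ []) :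
    pvChars (l ++ [x]) = pvChars l ++ ' ' :: x.toList := by
  simp only [pvChars, PySem.Str.toList_join, List.map_append, List.map_cons, List.map_nil]
  rw [pvJoin_append_singleton _ _ _ (by simpa using h)]
  simp

theorem pvScanB_fold (d : List (String × String)) (l : List String) :
    l.foldl
      (fun (st : Nat × List Char × Option (Nat × String)) ph =>
        let n := st.1 + 1
        let ng := if n = 1 then ph.toList else st.2.1 ++ ' ' :: ph.toList
        match (PySem.Dict.mk d).get? (String.ofList ng) with
        | some w => (n, ng, some (n, w))
        | none => (n, ng, st.2.2))
      (0, [], none) = (l.length, pvChars l, pvF l d l.length) := by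
  induction l using List.reverseRecOn with
  | nil => simp [pvChars, pvF, PySem.Str.join]
  | append_singleton l x ih =>
    rw [List.foldl_append, ih]
    simp only [List.foldl_cons, List.foldl_nil, List.length_append, List.length_cons,
      List.length_nil]
    have hng : (if l.length + 1 = 1 then x.toList else pvChars l ++ ' ' :: x.toList)
        = pvChars (l ++ [x]) := by
      cases l with
      | nil => simp [pvChars, PySem.Str.toList_join, PySem.Chars.join_singleton]
      | cons y ys =>
        rw [pvChars_append_singleton _ _ (by simp), if_neg (by simp)]
    have hkey : String.ofList (pvChars (l ++ [x])) = PySem.Str.join " " (l ++ [x]) := by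
      simp only [pvChars, String.ofList_toList]
    have hF : ∀ m ≤ l.length, pvF (l ++ [x]) d m = pvF l d m := fun m hm =>
      pvF_congr _ _ _ _ (fun k hk => List.take_append_of_le_length (by omega))
    have htake : (l ++ [x]).take (l.length + 1) = l ++ [x] := by simp
    simp only [hng, hkey]
    cases hg : (PySem.Dict.mk d).get? (PySem.Str.join " " (l ++ [x])) with
    | some w => simp [pvF, htake, hg]
    | none => simp [pvF, htake, hg, hF l.length le_rfl]

theorem pvScanB_eq (t : List String) (d : List (String × String)) (L : Nat) :
    pvScanB d (t.take L) = pvF t d (min L t.length) := by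
  unfold pvScanB
  rw [pvScanB_fold]
  simp only [List.length_take]
  exact pvF_congr _ _ _ _ (fun m hm => by
    rw [List.take_take]
    congr 1
    omega)

theorem pvLoop_eq (pp : List String) (d : List (String × String)) (max_n : Int) (fuel i : Nat) :
    pvLoopA pp d max_n fuel i = pvLoopB d max_n fuel (pp.drop i) := by
  induction fuel generalizing i with
  | zero => rfl
  | succ fuel ih =>
    cases hrest : pp.drop i with
    | nil =>
      have : ¬ i < pp.length := by
        have := congrArg List.length hrest
        simp at this
        omega
      simp [pvLoopA, pvLoopB, this]
    | cons r rs =>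
      have hi : i < pp.length := by
        have := congrArg List.length hrest
        simp at this
        omega
      have hscan : pvScanB d (if max_n > 0 then (pp.drop i).take max_n.toNat else [])
          = pvF (pp.drop i) d (min max_n ((pp.length : Int) - (i : Int))).toNat := by
        by_cases hmn : max_n > 0
        · rw [if_pos hmn, pvScanB_eq]
          congr 1
          have : (pp.drop i).length = pp.length - i := by simp
          omega
        · rw [if_neg hmn]
          have h0 : (min max_n ((pp.length : Int) - (i : Int))).toNat = 0 := by omega
          rw [h0]
          rfl
      have hB : pvLoopB d max_n (fuel + 1) (pp.drop i)
          = match pvScanB d (if max_n > 0 then (pp.drop i).take max_n.toNat else []) with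
            | some (n, w) => w :: pvLoopB d max_n fuel ((pp.drop i).drop n)
            | none => pvLoopB d max_n fuel (pp.drop i).tail := by
        rw [hrest]
        rfl
      rw [← hrest, hB, hscan]
      simp only [pvLoopA, if_pos hi, pvFindA_eq]
      cases hf : pvF (pp.drop i) d (min max_n ((pp.length : Int) - (i : Int))).toNat with
      | none =>
        simpa [List.tail_drop] using ih (i + 1)
      | some p =>
        obtain ⟨m, w⟩ := p
        simp only [Option.map_some, List.drop_drop, Int.toNat_natCast]
        exact congrArg (w :: ·) (ih (i + m))

-- ===== VERDICT (by name: the statement is the Claim_ definition above) =====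
theorem phonemes_to_words_spec : Claim_equal_phonemes_to_words := by
  intro pp d mn _
  unfold Spec_phonemes_to_words phonemes_to_words phonemes_to_words_alt
  simpa using pvLoop_eq pp d mn pp.length 0
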